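-- pv_equiv track=rewrite | github.com/dsaban/warl0k_dash_app_ai_server | app/2_demo_pim_attacks_p2p.py | compute_scoreboard
-- ===== SOURCE A (Python) =====
-- from typing import Dict, Any, List, Tuple, Optional
--
-- DETERMINISTIC_GATES = {
--     "DROP: wrong session_id": "deterministic",
--     "DROP: wrong window_id (drift/replay)": "deterministic",
--     "DROP: step mismatch (reorder/drop)": "deterministic",
--     "DROP: counter mismatch (replay/fork)": "deterministic",
--     "DROP: mac_chain mismatch (splice/tamper)": "deterministic",
-- }
--
-- NANO_GATES = {
--     "DROP: dt_ms anomaly (time-warp/burst)": "nano",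
--     "DROP: op_code not in allowlist": "nano",
--     "DROP: os_meas outside learned range (mimic/impersonation)": "nano",
-- }
--
-- def compute_scoreboard(trace: List[Dict[str, Any]]) -> Dict[str, Any]:
--     counts = {}
--     for r in trace:
--         if r["decision"] == "DROP":
--             counts[r["reason"]] = counts.get(r["reason"], 0) + 1
--     # Also count categories (deterministic vs nano)
--     cat = {"deterministic": 0, "nano": 0, "other": 0}
--     for reason, n in counts.items():
--         if reason in DETERMINISTIC_GATES:
--             cat["deterministic"] += n
--         elif reason in NANO_GATES:
--             cat["nano"] += n
--         else:
--             cat["other"] += n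
--     return {"reasons": counts, "categories": cat}
-- ===== SOURCE B (Python) =====
-- from typing import Dict, Any, List, Tuple, Optional
--
-- DETERMINISTIC_GATES = {
--     "DROP: wrong session_id": "deterministic",
--     "DROP: wrong window_id (drift/replay)": "deterministic",
--     "DROP: step mismatch (reorder/drop)": "deterministic",
--     "DROP: counter mismatch (replay/fork)": "deterministic",
--     "DROP: mac_chain mismatch (splice/tamper)": "deterministic",
-- }
--
-- NANO_GATES = {
--     "DROP: dt_ms anomaly (time-warp/burst)": "nano",
--     "DROP: op_code not in allowlist": "nano",
--     "DROP: os_meas outside learned range (mimic/impersonation)": "nano",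
-- }
--
-- def compute_scoreboard(trace: List[Dict[str, Any]]) -> Dict[str, Any]:
--     # Single pass: count reasons and tally the three categories with plain
--     # integer counters, instead of a second loop over the aggregated counts.
--     counts = {}
--     det = nano = other = 0
--     for r in trace:
--         if r["decision"] == "DROP":
--             reason = r["reason"]
--             counts[reason] = counts.get(reason, 0) + 1
--             if reason in DETERMINISTIC_GATES:
--                 det += 1
--             elif reason in NANO_GATES:
--                 nano += 1
--             else:
--                 other += 1
--     return {"reasons": counts,
--             "categories": {"deterministic": det, "nano": nano, "other": other}}
-- ===== Notes on version B (the rewrite author's own statement) =====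
-- stated objective: simpler
-- what changed: One pass: categories are tallied with three integer counters while counting reasons, removing the second loop over the aggregated counts dict entirely.
import Mathlib
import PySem

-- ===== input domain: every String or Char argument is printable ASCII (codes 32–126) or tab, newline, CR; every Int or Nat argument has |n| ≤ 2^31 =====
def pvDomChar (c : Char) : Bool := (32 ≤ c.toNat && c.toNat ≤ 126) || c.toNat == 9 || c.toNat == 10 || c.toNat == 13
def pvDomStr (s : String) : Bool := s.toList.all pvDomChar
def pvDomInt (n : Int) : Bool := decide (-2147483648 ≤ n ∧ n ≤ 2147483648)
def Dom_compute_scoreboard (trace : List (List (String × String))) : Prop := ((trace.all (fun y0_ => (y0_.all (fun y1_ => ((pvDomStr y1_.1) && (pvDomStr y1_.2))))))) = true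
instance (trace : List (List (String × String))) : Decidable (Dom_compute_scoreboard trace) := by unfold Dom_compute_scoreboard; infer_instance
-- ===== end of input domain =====

-- B fuses A's two loops into one pass, tallying the three gate categories with
-- plain integer counters while counting DROP reasons (objective: simpler).


-- ===== PORT A =====
def detGates : PySem.Dict String String := PySem.Dict.mk [
  ("DROP: wrong session_id", "deterministic"),
  ("DROP: wrong window_id (drift/replay)", "deterministic"),
  ("DROP: step mismatch (reorder/drop)", "deterministic"),
  ("DROP: counter mismatch (replay/fork)", "deterministic"),
  ("DROP: mac_chain mismatch (splice/tamper)", "deterministic")]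

def nanoGates : PySem.Dict String String := PySem.Dict.mk [
  ("DROP: dt_ms anomaly (time-warp/burst)", "nano"),
  ("DROP: op_code not in allowlist", "nano"),
  ("DROP: os_meas outside learned range (mimic/impersonation)", "nano")]

-- r["decision"] / r["reason"] ported as getD with a dummy default: Pre_ below
-- excludes exactly the KeyError inputs, so the default is never read on admitted inputs.
def compute_scoreboard (trace : List (List (String × String))) : List (String × List (String × Int)) :=
  let counts : PySem.Dict String Int := trace.foldl (fun counts r =>
    if (PySem.Dict.mk r).getD "decision" "" == "DROP" then
      counts.insert ((PySem.Dict.mk r).getD "reason" "")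
        (counts.getD ((PySem.Dict.mk r).getD "reason" "") 0 + 1)
    else counts) PySem.Dict.empty
  let cat : PySem.Dict String Int := counts.items.foldl (fun cat p =>
    if detGates.contains p.1 then cat.insert "deterministic" (cat.getD "deterministic" 0 + p.2)
    else if nanoGates.contains p.1 then cat.insert "nano" (cat.getD "nano" 0 + p.2)
    else cat.insert "other" (cat.getD "other" 0 + p.2))
    (PySem.Dict.mk [("deterministic", 0), ("nano", 0), ("other", 0)])
  [("reasons", counts.items), ("categories", cat.items)]

-- ===== PORT B =====
def compute_scoreboard_alt (trace : List (List (String × String))) : List (String × List (String × Int)) :=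
  let st : PySem.Dict String Int × Int × Int × Int := trace.foldl (fun st r =>
    if (PySem.Dict.mk r).getD "decision" "" == "DROP" then
      let reason := (PySem.Dict.mk r).getD "reason" ""
      let counts := st.1.insert reason (st.1.getD reason 0 + 1)
      if detGates.contains reason then (counts, st.2.1 + 1, st.2.2.1, st.2.2.2)
      else if nanoGates.contains reason then (counts, st.2.1, st.2.2.1 + 1, st.2.2.2)
      else (counts, st.2.1, st.2.2.1, st.2.2.2 + 1)
    else st) (PySem.Dict.empty, 0, 0, 0)
  [("reasons", st.1.items),
   ("categories", [("deterministic", st.2.1), ("nano", st.2.2.1), ("other", st.2.2.2)])]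

-- ===== PRECONDITION & SPEC =====
-- Pre_ excludes exactly the inputs where A raises KeyError: a record without a
-- "decision" key, or a DROP record without a "reason" key (B raises there too).
def Pre_compute_scoreboard (trace : List (List (String × String))) : Prop :=
  ∀ r ∈ trace, ((PySem.Dict.mk r).get? "decision").isSome = true ∧
    ((PySem.Dict.mk r).get? "decision" = some "DROP" → ((PySem.Dict.mk r).get? "reason").isSome = true)
instance (trace : List (List (String × String))) : Decidable (Pre_compute_scoreboard trace) := by unfold Pre_compute_scoreboard; infer_instance

def pvWitness_compute_scoreboard : (List (List (String × String))) :=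
  [[("decision", "DROP"), ("reason", "DROP: wrong session_id")], [("decision", "PASS")]]

def Spec_compute_scoreboard (trace : List (List (String × String))) (out : List (String × List (String × Int))) : Prop := out = compute_scoreboard_alt trace
instance (trace : List (List (String × String))) (out : List (String × List (String × Int))) : Decidable (Spec_compute_scoreboard trace out) := by unfold Spec_compute_scoreboard; infer_instance

-- ===== CLAIM (what is proved, stated in full; the proofs are below) =====
def Claim_equal_compute_scoreboard : Prop := ∀ (trace : List (List (String × String))), Dom_compute_scoreboard trace → Pre_compute_scoreboard trace → Spec_compute_scoreboard trace (compute_scoreboard trace)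

-- ===== LEMMAS AND PROOFS =====

-- weight of a reason towards each of the three category counters (A's elif chain)
def wD (s : String) : Int := if detGates.contains s then 1 else 0
def wN (s : String) : Int := if detGates.contains s then 0 else if nanoGates.contains s then 1 else 0
def wO (s : String) : Int := if detGates.contains s then 0 else if nanoGates.contains s then 0 else 1

def sumw (w : String → Int) (l : List (String × Int)) : Int :=
  (l.map (fun p => w p.1 * p.2)).sum

theorem sumw_cons (w : String → Int) (p : String × Int) (l : List (String × Int)) :
    sumw w (p :: l) = w p.1 * p.2 + sumw w l := by simp [sumw]

-- A's second loop, with the three fixed-key values generalized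
theorem catfold_eq (l : List (String × Int)) (a b c : Int) :
    l.foldl (fun cat p =>
      if detGates.contains p.1 then cat.insert "deterministic" (cat.getD "deterministic" 0 + p.2)
      else if nanoGates.contains p.1 then cat.insert "nano" (cat.getD "nano" 0 + p.2)
      else cat.insert "other" (cat.getD "other" 0 + p.2))
      (PySem.Dict.mk [("deterministic", a), ("nano", b), ("other", c)]) =
    PySem.Dict.mk [("deterministic", a + sumw wD l), ("nano", b + sumw wN l), ("other", c + sumw wO l)] := by
  induction l generalizing a b c with
  | nil => simp [sumw]
  | cons p t ih =>
    simp only [List.foldl_cons, sumw_cons, wD, wN, wO]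
    by_cases hd : detGates.contains p.1
    · rw [if_pos hd,
        show (PySem.Dict.mk [("deterministic", a), ("nano", b), ("other", c)]).insert "deterministic"
            ((PySem.Dict.mk [("deterministic", a), ("nano", b), ("other", c)]).getD "deterministic" 0 + p.2)
          = PySem.Dict.mk [("deterministic", a + p.2), ("nano", b), ("other", c)] from rfl, ih]
      simp [hd, add_assoc]
    · by_cases hn : nanoGates.contains p.1
      · rw [if_neg hd, if_pos hn,
          show (PySem.Dict.mk [("deterministic", a), ("nano", b), ("other", c)]).insert "nano"
              ((PySem.Dict.mk [("deterministic", a), ("nano", b), ("other", c)]).getD "nano" 0 + p.2)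
            = PySem.Dict.mk [("deterministic", a), ("nano", b + p.2), ("other", c)] from rfl, ih]
        simp [hd, hn]
        ring_nf
      · rw [if_neg hd, if_neg hn,
          show (PySem.Dict.mk [("deterministic", a), ("nano", b), ("other", c)]).insert "other"
              ((PySem.Dict.mk [("deterministic", a), ("nano", b), ("other", c)]).getD "other" 0 + p.2)
            = PySem.Dict.mk [("deterministic", a), ("nano", b), ("other", c + p.2)] from rfl, ih]
        simp [hd, hn]
        ring_nf

-- replacing the (unique) entry at key k by (k, v) moves the weighted sum accordingly
theorem sumw_map_replace (w : String → Int) (k : String) (v : Int) :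
    ∀ (l : List (String × Int)), (l.map Prod.fst).Nodup →
      (l.any fun p => p.1 == k) = true →
      sumw w (l.map (fun p => if p.1 == k then (k, v) else p)) =
        sumw w l - w k * (Option.map (fun x => x.2) (List.find? (fun p => p.1 == k) l)).getD 0 + w k * v := by
  intro l
  induction l with
  | nil => simp
  | cons q t ih =>
    intro hnd hany
    by_cases hq : (q.1 == k) = true
    · have hk : q.1 = k := by simpa using hq
      have hnot : ∀ p ∈ t, (p.1 == k) = false := by
        intro p hp
        have : q.1 ∉ t.map Prod.fst := by
          simp only [List.map_cons, List.nodup_cons] at hnd; exact hnd.1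
        simp only [beq_eq_false_iff_ne, ne_eq]
        intro hpk; exact this (hk ▸ hpk ▸ List.mem_map_of_mem hp)
      have htail : t.map (fun p => if p.1 == k then (k, v) else p) = t := by
        have h2 : t.map (fun p => if p.1 == k then (k, v) else p) = t.map id :=
          List.map_congr_left (fun p hp => by simp [hnot p hp])
        simpa using h2
      rw [List.find?_cons_of_pos (p := fun p => p.1 == k) (a := q) (l := t) hq]
      simp only [List.map_cons, if_pos hq, htail, Option.map_some, Option.getD_some, sumw_cons]
      rw [hk]
      ring
    · rw [List.find?_cons_of_neg (p := fun p => p.1 == k) (a := q) (l := t) hq]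
      simp only [List.map_cons, if_neg (by simp [hq] : ¬ (q.1 == k) = true), sumw_cons]
      simp only [List.map_cons, List.nodup_cons] at hnd
      have hany' : (t.any fun p => p.1 == k) = true := by
        simpa [hq] using hany
      rw [ih hnd.2 hany']
      ring

-- one counting step moves each weighted sum by the weight of the inserted key
theorem sumw_insert (w : String → Int) (d : PySem.Dict String Int) (k : String)
    (hnd : d.keys.Nodup) :
    sumw w (d.insert k (d.getD k 0 + 1)).items = sumw w d.items + w k := by
  by_cases hc : d.contains k
  · have hany : (d.items.any fun p => p.1 == k) = true := by
      simpa [PySem.Dict.contains] using hc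
    have hnd' : (d.items.map Prod.fst).Nodup := by
      simpa [PySem.Dict.keys] using hnd
    have hgetD : d.getD k 0 = (Option.map (fun x => x.2) (List.find? (fun p => p.1 == k) d.items)).getD 0 := by
      simp [PySem.Dict.getD, PySem.Dict.get?]
    simp only [PySem.Dict.insert, hc, if_true]
    rw [sumw_map_replace w k _ d.items hnd' hany, hgetD]
    ring
  · have hc' : d.contains k = false := by simpa using hc
    have hgetD : d.getD k 0 = 0 := PySem.Dict.getD_of_not_contains d 0 hc'
    simp only [PySem.Dict.insert, hc', Bool.false_eq_true, if_false]
    simp [sumw, hgetD]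

-- B's single pass equals A's counting pass paired with the three weighted sums
theorem bfold (t : List (List (String × String))) :
    ∀ (c : PySem.Dict String Int) (d n o : Int), c.keys.Nodup →
      t.foldl (fun st r =>
        if (PySem.Dict.mk r).getD "decision" "" == "DROP" then
          let reason := (PySem.Dict.mk r).getD "reason" ""
          let counts := st.1.insert reason (st.1.getD reason 0 + 1)
          if detGates.contains reason then (counts, st.2.1 + 1, st.2.2.1, st.2.2.2)
          else if nanoGates.contains reason then (counts, st.2.1, st.2.2.1 + 1, st.2.2.2)
          else (counts, st.2.1, st.2.2.1, st.2.2.2 + 1)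
        else st) (c, d, n, o) =
      (let K := t.foldl (fun counts r =>
          if (PySem.Dict.mk r).getD "decision" "" == "DROP" then
            counts.insert ((PySem.Dict.mk r).getD "reason" "")
              (counts.getD ((PySem.Dict.mk r).getD "reason" "") 0 + 1)
          else counts) c;
        (K, d + sumw wD K.items - sumw wD c.items,
            n + sumw wN K.items - sumw wN c.items,
            o + sumw wO K.items - sumw wO c.items)) := by
  induction t with
  | nil => intro c d n o _; simp
  | cons r t ih =>
    intro c d n o hnd
    simp only [List.foldl_cons]
    by_cases hdec : ((PySem.Dict.mk r).getD "decision" "" == "DROP") = true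
    · simp only [hdec, if_true]
      have hnd' : ((c.insert ((PySem.Dict.mk r).getD "reason" "")
          (c.getD ((PySem.Dict.mk r).getD "reason" "") 0 + 1)).keys).Nodup :=
        PySem.Dict.nodup_keys_insert _ _ _ hnd
      have hs := fun w => sumw_insert w c ((PySem.Dict.mk r).getD "reason" "") hnd
      by_cases hd : detGates.contains ((PySem.Dict.mk r).getD "reason" "")
      · simp only [hd, if_true]
        rw [ih _ (d + 1) n o hnd']
        simp only [hs, wD, wN, wO, hd, if_true]
        refine congrArg _ ?_
        simp only [Prod.mk.injEq]
        refine ⟨by ring, by ring, by ring⟩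
      · by_cases hn : nanoGates.contains ((PySem.Dict.mk r).getD "reason" "")
        · simp only [hd, hn, Bool.false_eq_true, if_false, if_true]
          rw [ih _ d (n + 1) o hnd']
          simp only [hs, wD, wN, wO, hd, hn, Bool.false_eq_true, if_true, if_false]
          refine congrArg _ ?_
          simp only [Prod.mk.injEq]
          refine ⟨by ring, by ring, by ring⟩
        · simp only [hd, hn, Bool.false_eq_true, if_false]
          rw [ih _ d n (o + 1) hnd']
          simp only [hs, wD, wN, wO, hd, hn, Bool.false_eq_true, if_false]
          refine congrArg _ ?_
          simp only [Prod.mk.injEq]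
          refine ⟨by ring, by ring, by ring⟩
    · simp only [hdec, Bool.false_eq_true, if_false]
      exact ih c d n o hnd

-- ===== VERDICT (by name: the statement is the Claim_ definition above) =====
theorem compute_scoreboard_spec : Claim_equal_compute_scoreboard := by
  intro trace _ _
  show compute_scoreboard trace = compute_scoreboard_alt trace
  unfold compute_scoreboard compute_scoreboard_alt
  simp only [bfold trace PySem.Dict.empty 0 0 0 (by simp),
    catfold_eq]
  simp [sumw, PySem.Dict.empty]
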